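-- pv_equiv track=rewrite | github.com/anandtopu/data-structures-algorithms | codechef/Greedy/MaximumWeightDifference.py | max_weight_difference
-- ===== SOURCE A (Python) =====
-- def max_weight_difference(test_cases):
--     results = []
--
--     for case in test_cases:
--         N, K, weights = case
--         weights.sort()
--         total_sum = sum(weights)
--
--         # choose the smaller of K and N-K
--         K = min(K, N - K)
--
--         # sum of K smallest items
--         sum_light = sum(weights[:K])
--
--         # calculate the difference
--
--         diff = abs((total_sum - sum_light) - sum_light)
--
--         # max difference
--         results.append(diff)
--     return results
-- ===== SOURCE B (Python) =====
-- def _sum_smallest(lst, c):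
--     # sum of the c smallest elements of lst (c already clamped to [0, len(lst)]),
--     # by quickselect-style three-way partitioning around a middle pivot
--     if c <= 0:
--         return 0
--     if c >= len(lst):
--         return sum(lst)
--     p = lst[len(lst) // 2]
--     lo = [x for x in lst if x < p]
--     eq = [x for x in lst if x == p]
--     hi = [x for x in lst if x > p]
--     if c <= len(lo):
--         return _sum_smallest(lo, c)
--     if c <= len(lo) + len(eq):
--         return sum(lo) + p * (c - len(lo))
--     return sum(lo) + p * len(eq) + _sum_smallest(hi, c - len(lo) - len(eq))
--
--
-- def max_weight_difference(test_cases):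
--     out = []
--     for N, K, weights in test_cases:
--         L = len(weights)
--         k = min(K, N - K)
--         # number of items weights[:k] would take (Python slice clamping)
--         c = max(0, min(L, L + k if k < 0 else k))
--         light = _sum_smallest(weights, c)
--         out.append(abs(sum(weights) - 2 * light))
--     return out
-- ===== Notes on version B (the rewrite author's own statement) =====
-- stated objective: alternative
-- what changed: Replaces the per-case full sort + prefix slice with a quickselect-style three-way partition that sums the c smallest weights directly (c computed from Python's slice clamping), without ever sorting.
import Mathlib
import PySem

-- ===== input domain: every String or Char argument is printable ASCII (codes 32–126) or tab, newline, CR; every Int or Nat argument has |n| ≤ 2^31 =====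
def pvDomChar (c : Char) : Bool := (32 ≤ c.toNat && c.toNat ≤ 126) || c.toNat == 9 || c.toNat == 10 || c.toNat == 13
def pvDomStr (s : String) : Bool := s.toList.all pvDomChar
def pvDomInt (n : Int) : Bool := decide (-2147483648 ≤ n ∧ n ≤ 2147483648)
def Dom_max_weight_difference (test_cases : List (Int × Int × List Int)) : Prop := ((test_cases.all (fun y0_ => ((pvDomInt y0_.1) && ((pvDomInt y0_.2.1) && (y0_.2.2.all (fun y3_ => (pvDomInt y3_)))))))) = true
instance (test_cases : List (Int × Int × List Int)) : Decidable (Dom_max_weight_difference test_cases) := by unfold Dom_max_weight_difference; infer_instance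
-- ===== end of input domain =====

-- B replaces A's per-case sort + prefix slice by a quickselect-style three-way partition
-- summing the c smallest weights directly (alternative algorithm; equivalence is about the
-- RETURN value only: A sorts each weights list in place, B does not mutate its input).


-- ===== PORT A =====
def max_weight_difference (test_cases : List (Int × Int × List Int)) : List Int :=
  test_cases.foldl
    (fun results case =>
      let N := case.1
      let K := case.2.1
      let weights := PySem.List.sorted case.2.2 (fun x => x) false  -- weights.sort()
      let total_sum := weights.sum
      let K := min K (N - K)
      let sum_light := (PySem.List.slice weights none (some K)).sum
      let diff := |total_sum - sum_light - sum_light|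
      results ++ [diff])
    []

-- ===== PORT B =====
-- helper `_sum_smallest` of Source B; `lst[len(lst)//2]` is ported as getD with default 0:
-- the index is in range there (0 < c < len lst ⇒ lst ≠ []), so this is exact.
def pvSumSmallest (lst : List Int) (c : Int) : Int :=
  if c ≤ 0 then 0
  else if (lst.length : Int) ≤ c then lst.sum
  else
    let p := lst.getD (lst.length / 2) 0
    let lo := lst.filter (fun x => x < p)
    let eq := lst.filter (fun x => x == p)
    let hi := lst.filter (fun x => p < x)
    if c ≤ (lo.length : Int) then pvSumSmallest lo c
    else if c ≤ (lo.length : Int) + (eq.length : Int) then lo.sum + p * (c - lo.length)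
    else lo.sum + p * (eq.length : Int) + pvSumSmallest hi (c - lo.length - eq.length)
termination_by lst.length
decreasing_by
  all_goals
  · have hlen : 0 < lst.length := by omega
    have hidx : lst.length / 2 < lst.length := Nat.div_lt_self hlen (by omega)
    have hp : lst.getD (lst.length / 2) 0 ∈ lst := by
      rw [List.getD_eq_getElem lst 0 hidx]; exact List.getElem_mem hidx
    simp only [List.length_unattach]
    exact lt_of_lt_of_le
      (List.length_filter_lt_length_iff_exists.mpr ⟨⟨_, hp⟩, List.mem_attach _ _, by simp⟩)
      (le_of_eq List.length_attach)

def max_weight_difference_alt (test_cases : List (Int × Int × List Int)) : List Int :=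
  test_cases.foldl
    (fun out case =>
      let N := case.1
      let K := case.2.1
      let weights := case.2.2
      let L : Int := weights.length
      let k := min K (N - K)
      let c := max 0 (min L (if k < 0 then L + k else k))
      let light := pvSumSmallest weights c
      out ++ [|weights.sum - 2 * light|])
    []

-- ===== PRECONDITION & SPEC =====
def Spec_max_weight_difference (test_cases : List (Int × Int × List Int)) (out : List Int) : Prop := out = max_weight_difference_alt test_cases
instance (test_cases : List (Int × Int × List Int)) (out : List Int) : Decidable (Spec_max_weight_difference test_cases out) := by unfold Spec_max_weight_difference; infer_instance

-- ===== CLAIM (what is proved, stated in full; the proofs are below) =====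
def Claim_equal_max_weight_difference : Prop := ∀ (test_cases : List (Int × Int × List Int)), Dom_max_weight_difference test_cases → Spec_max_weight_difference test_cases (max_weight_difference test_cases)

-- ===== LEMMAS AND PROOFS =====

-- the two loop bodies, named for the proofs (definitionally the folds' step functions)
def pvStepA (results : List Int) (case : Int × Int × List Int) : List Int :=
  let N := case.1
  let K := case.2.1
  let weights := PySem.List.sorted case.2.2 (fun x => x) false
  let total_sum := weights.sum
  let K := min K (N - K)
  let sum_light := (PySem.List.slice weights none (some K)).sum
  let diff := |total_sum - sum_light - sum_light|
  results ++ [diff]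

def pvStepB (out : List Int) (case : Int × Int × List Int) : List Int :=
  let N := case.1
  let K := case.2.1
  let weights := case.2.2
  let L : Int := weights.length
  let k := min K (N - K)
  let c := max 0 (min L (if k < 0 then L + k else k))
  let light := pvSumSmallest weights c
  out ++ [|weights.sum - 2 * light|]

-- the partition filters, cleaned of the `attach` bookkeeping of the wf-recursive definition
theorem pvSumSmallest_unfold (lst : List Int) (c : Int) (h1 : ¬ c ≤ 0)
    (h2 : ¬ (lst.length : Int) ≤ c) :
    pvSumSmallest lst c =
      (if c ≤ ((lst.filter (fun x => decide (x < lst.getD (lst.length / 2) 0))).length : Int) then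
        pvSumSmallest (lst.filter (fun x => decide (x < lst.getD (lst.length / 2) 0))) c
       else if c ≤ ((lst.filter (fun x => decide (x < lst.getD (lst.length / 2) 0))).length : Int) +
          ((lst.filter (fun x => x == lst.getD (lst.length / 2) 0)).length : Int) then
        (lst.filter (fun x => decide (x < lst.getD (lst.length / 2) 0))).sum +
          lst.getD (lst.length / 2) 0 *
            (c - (lst.filter (fun x => decide (x < lst.getD (lst.length / 2) 0))).length)
       else
        (lst.filter (fun x => decide (x < lst.getD (lst.length / 2) 0))).sum +
          lst.getD (lst.length / 2) 0 * ((lst.filter (fun x => x == lst.getD (lst.length / 2) 0)).length : Int) +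
          pvSumSmallest (lst.filter (fun x => decide (lst.getD (lst.length / 2) 0 < x)))
            (c - (lst.filter (fun x => decide (x < lst.getD (lst.length / 2) 0))).length -
              (lst.filter (fun x => x == lst.getD (lst.length / 2) 0)).length)) := by
  rw [pvSumSmallest]
  simp only [if_neg h1, if_neg h2]

-- the c smallest elements of lst sum to the sum of the first c of sorted(lst)
theorem pvSumSmallest_eq_aux (n : Nat) : ∀ (l : List Int), l.length ≤ n → ∀ c : Int,
    pvSumSmallest l c = ((PySem.List.sorted l (fun x => x) false).take c.toNat).sum := by
  induction n with
  | zero =>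
    intro l hl c
    have : l = [] := List.length_eq_zero_iff.mp (Nat.le_zero.mp hl)
    subst this
    rw [pvSumSmallest]
    have hnil : PySem.List.sorted ([] : List Int) (fun x => x) false = [] := rfl
    split_ifs with hc1 hc2
    · simp [hnil]
    · simp [hnil]
    · simp at hc2
      omega
  | succ n ih =>
    intro l hl c
    by_cases h1 : c ≤ 0
    · rw [pvSumSmallest]
      rw [if_pos h1]
      have : c.toNat = 0 := by omega
      simp [this]
    · by_cases h2 : (l.length : Int) ≤ c
      · rw [pvSumSmallest]
        rw [if_neg h1, if_pos h2]
        have hlen : (PySem.List.sorted l (fun x => x) false).length ≤ c.toNat := by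
          rw [PySem.List.length_sorted]; omega
        rw [List.take_of_length_le hlen]
        exact ((PySem.List.sorted_perm l (fun x => x) false).sum_eq).symm
      · rw [pvSumSmallest_unfold l c h1 h2]
        set p := l.getD (l.length / 2) 0 with hp
        set lo := l.filter (fun x => decide (x < p)) with hlo
        set eqs := l.filter (fun x => x == p) with heqs
        set hi := l.filter (fun x => decide (p < x)) with hhi
        -- p is a member of l, so eqs is nonempty
        have hlpos : 0 < l.length := by omega
        have hidx : l.length / 2 < l.length := Nat.div_lt_self hlpos (by omega)
        have hpmem : p ∈ l := by
          rw [hp, List.getD_eq_getElem l 0 hidx]; exact List.getElem_mem hidx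
        have heqsne : 0 < eqs.length := by
          rw [heqs]
          exact List.length_pos_iff.mpr
            (List.ne_nil_of_mem (List.mem_filter.mpr ⟨hpmem, by simp⟩))
        -- the three filters partition l (as a permutation)
        have hperm : (lo ++ (eqs ++ hi)).Perm l := by
          have h1p := List.filter_append_perm (fun x => decide (x < p)) l
          have h2p := List.filter_append_perm (fun x => x == p)
            (l.filter (fun x => !decide (x < p)))
          have he : (l.filter (fun x => !decide (x < p))).filter (fun x => x == p) = eqs := by
            rw [List.filter_filter, heqs]
            apply List.filter_congr
            intro x _
            by_cases hx : x = p <;> simp [hx]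
          have hh : (l.filter (fun x => !decide (x < p))).filter (fun x => !(x == p)) = hi := by
            rw [List.filter_filter, hhi]
            apply List.filter_congr
            intro x _
            rcases lt_trichotomy x p with h | h | h
            · have h1' : ¬ p < x := by omega
              have h2' : ¬ x = p := by omega
              simp [h, h1']
            · simp [h]
            · have h1' : ¬ x < p := by omega
              have h2' : ¬ x = p := by omega
              simp [h, h1', h2']
          rw [he, hh] at h2p
          exact (h2p.append_left lo).trans h1p
        -- sorted(l) is sorted(lo) ++ replicate |eqs| p ++ sorted(hi)
        have heqs_rep : eqs = List.replicate eqs.length p := by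
          rw [heqs]
          apply List.eq_replicate_of_mem
          intro b hb
          have := (List.mem_filter.mp hb).2
          simpa using this
        have hsorted : PySem.List.sorted l (fun x => x) false =
            PySem.List.sorted lo (fun x => x) false ++
            (List.replicate eqs.length p ++ PySem.List.sorted hi (fun x => x) false) := by
          apply PySem.List.sorted_id_eq_of_perm_of_pairwise
          · refine List.Perm.trans ?_ hperm
            apply List.Perm.append (PySem.List.sorted_perm lo (fun x => x) false)
            apply List.Perm.append _ (PySem.List.sorted_perm hi (fun x => x) false)
            rw [← heqs_rep]
          · rw [List.pairwise_append]
            refine ⟨PySem.List.sorted_pairwise lo (fun x => x), ?_, ?_⟩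
            · rw [List.pairwise_append]
              refine ⟨List.pairwise_replicate.mpr (Or.inr (le_refl p)), PySem.List.sorted_pairwise hi (fun x => x), ?_⟩
              intro a ha b hb
              have ha' : a = p := List.eq_of_mem_replicate ha
              have hb' : b ∈ hi := (PySem.List.mem_sorted hi (fun x => x) false b).mp hb
              have := (List.mem_filter.mp (hhi ▸ hb')).2
              subst ha'
              simp at this
              exact le_of_lt this
            · intro a ha b hb
              have ha' : a ∈ lo := (PySem.List.mem_sorted lo (fun x => x) false a).mp ha
              have halt : a < p := by
                have := (List.mem_filter.mp (hlo ▸ ha')).2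
                simpa using this
              rcases List.mem_append.mp hb with hb | hb
              · have : b = p := List.eq_of_mem_replicate hb
                subst this; exact le_of_lt halt
              · have hb' : b ∈ hi := (PySem.List.mem_sorted hi (fun x => x) false b).mp hb
                have : p < b := by
                  have := (List.mem_filter.mp (hhi ▸ hb')).2
                  simpa using this
                exact le_of_lt (lt_trans halt this)
        rw [hsorted]
        have hlolen : (PySem.List.sorted lo (fun x => x) false).length = lo.length :=
          PySem.List.length_sorted lo (fun x => x) false
        have hlosum : (PySem.List.sorted lo (fun x => x) false).sum = lo.sum :=
          (PySem.List.sorted_perm lo (fun x => x) false).sum_eq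
        have hlo_lt : lo.length < l.length := by
          have := List.Perm.length_eq hperm
          simp at this
          omega
        have hhi_lt : hi.length < l.length := by
          have := List.Perm.length_eq hperm
          simp at this
          omega
        by_cases h3 : c ≤ (lo.length : Int)
        · rw [if_pos h3]
          rw [List.take_append_of_le_length (by rw [hlolen]; omega)]
          exact ih lo (by omega) c
        · rw [if_neg h3]
          rw [List.take_append, hlolen, List.take_of_length_le (by omega), List.take_append,
            List.take_replicate, List.length_replicate]
          by_cases h4 : c ≤ (lo.length : Int) + (eqs.length : Int)
          · rw [if_pos h4]
            have hmin : min (c.toNat - lo.length) eqs.length = c.toNat - lo.length := by omega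
            have hz : c.toNat - lo.length - eqs.length = 0 := by omega
            rw [hmin, hz, List.take_zero]
            simp only [List.sum_append, List.sum_nil, List.sum_replicate, nsmul_eq_mul, hlosum,
              add_zero]
            have hcast : ((c.toNat - lo.length : Nat) : Int) = c - lo.length := by omega
            rw [hcast]
            ring
          · rw [if_neg h4]
            have hmin : min (c.toNat - lo.length) eqs.length = eqs.length := by omega
            rw [hmin]
            have harg : (c - (lo.length : Int) - (eqs.length : Int)).toNat
                = c.toNat - lo.length - eqs.length := by omega
            rw [ih hi (by omega) (c - lo.length - eqs.length), harg]
            simp only [List.sum_append, List.sum_replicate, nsmul_eq_mul, hlosum]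
            ring

theorem pvSumSmallest_eq (l : List Int) (c : Int) :
    pvSumSmallest l c = ((PySem.List.sorted l (fun x => x) false).take c.toNat).sum :=
  pvSumSmallest_eq_aux l.length l (le_refl _) c

theorem pvStep_eq (acc : List Int) (case : Int × Int × List Int) :
    pvStepA acc case = pvStepB acc case := by
  obtain ⟨N, K, w⟩ := case
  simp only [pvStepA, pvStepB]
  congr 1
  congr 1
  -- |sorted.sum - s - s| = |w.sum - 2 * light|
  set k := min K (N - K) with hk
  set L : Int := (w.length : Int) with hL
  set c := max 0 (min L (if k < 0 then L + k else k)) with hc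
  have hslice : PySem.List.slice (PySem.List.sorted w (fun x => x) false) none (some k)
      = (PySem.List.sorted w (fun x => x) false).take c.toNat := by
    simp only [PySem.List.slice, PySem.List.clampIdx, PySem.List.length_sorted]
    rw [List.drop_zero]
    congr 1
    simp only [hc, hL]
    split_ifs <;> omega
  rw [hslice, ← pvSumSmallest_eq]
  have hsum : (PySem.List.sorted w (fun x => x) false).sum = w.sum :=
    (PySem.List.sorted_perm w (fun x => x) false).sum_eq
  rw [hsum]
  congr 1
  ring

theorem pvFold_eq (l : List (Int × Int × List Int)) : ∀ (acc : List Int),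
    l.foldl pvStepA acc = l.foldl pvStepB acc := by
  induction l with
  | nil => intro acc; rfl
  | cons hd tl ih =>
    intro acc
    simp only [List.foldl_cons]
    rw [pvStep_eq acc hd]
    exact ih _

-- ===== VERDICT (by name: the statement is the Claim_ definition above) =====
theorem max_weight_difference_spec : Claim_equal_max_weight_difference := by
  intro tcs _
  show max_weight_difference tcs = max_weight_difference_alt tcs
  show tcs.foldl pvStepA [] = tcs.foldl pvStepB []
  exact pvFold_eq tcs []
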